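-- pv_equiv track=rewrite | github.com/TEESlab-UPRC/DREEM | auxiliary.py | continresult
-- ===== SOURCE A (Python) =====
-- def continresult(numhours, hr, values):
--     var = [0 for k in range(numhours)]
--     j = 0
--     temp = 0
--     for i in range(len(hr)-1):
--         if hr[i] != hr[i+1]:
--             var[j] = values[i] - temp
--             temp += var[j]
--             j += 1
--     return var
-- ===== SOURCE B (Python) =====
-- def continresult(numhours, hr, values):
--     idx = [i for i in range(len(hr) - 1) if hr[i] != hr[i + 1]]
--     pts = [values[i] for i in idx]
--     var = [b - a for a, b in zip([0] + pts[:-1], pts)]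
--     var += [0] * (numhours - len(var))
--     return var
-- ===== Notes on version B (the rewrite author's own statement) =====
-- stated objective: alternative
-- what changed: Replaces A's single interleaved loop with mutable state (var written in place, running j and temp) by a pipeline: collect change-point indices, read their values, take successive differences with a zip, and pad with zeros to numhours.
import Mathlib
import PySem

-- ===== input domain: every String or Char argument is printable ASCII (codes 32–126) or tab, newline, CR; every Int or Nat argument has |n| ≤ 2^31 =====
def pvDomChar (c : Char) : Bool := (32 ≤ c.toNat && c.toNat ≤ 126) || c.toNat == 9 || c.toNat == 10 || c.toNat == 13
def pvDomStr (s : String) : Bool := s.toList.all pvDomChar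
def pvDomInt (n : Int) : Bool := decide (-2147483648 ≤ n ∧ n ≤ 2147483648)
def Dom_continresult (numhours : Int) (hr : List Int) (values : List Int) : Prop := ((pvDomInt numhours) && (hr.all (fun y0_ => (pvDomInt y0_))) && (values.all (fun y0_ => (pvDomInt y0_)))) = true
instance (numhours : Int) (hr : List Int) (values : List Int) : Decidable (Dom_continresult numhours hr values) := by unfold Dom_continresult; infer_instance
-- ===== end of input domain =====

-- B replaces A's interleaved stateful loop by a pipeline (collect change indices, read values, zip-difference, pad); same cost, different decomposition.


-- ===== PORT A =====
-- one loop step: 'if hr[i] != hr[i+1]: var[j] = values[i] - temp; temp += var[j]; j += 1'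
-- (indices i, i+1 into hr are always in range, so pyGetD is exact there; var[j] write and
-- values[i] read are in range exactly on Pre_, which is where equality is claimed)
def contStep (hr values : List Int) (s : List Int × Int × Int) (i : Int) : List Int × Int × Int :=
  match s with
  | (var, j, temp) =>
    if PySem.List.pyGetD hr i 0 ≠ PySem.List.pyGetD hr (i + 1) 0 then
      let v := PySem.List.pyGetD values i 0 - temp
      (var.set j.toNat v, j + 1, temp + v)
    else (var, j, temp)

def continresult (numhours : Int) (hr : List Int) (values : List Int) : List Int :=
  let var : List Int := (PySem.List.pyRange 0 numhours 1).map (fun _ => 0)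
  ((PySem.List.pyRange 0 ((hr.length : Int) - 1) 1).foldl (contStep hr values) (var, 0, 0)).1

-- ===== PORT B =====
def continresult_alt (numhours : Int) (hr : List Int) (values : List Int) : List Int :=
  let idx := (PySem.List.pyRange 0 ((hr.length : Int) - 1) 1).filter
      (fun i => decide (PySem.List.pyGetD hr i 0 ≠ PySem.List.pyGetD hr (i + 1) 0))
  let pts := idx.map (fun i => PySem.List.pyGetD values i 0)
  let var := ((0 :: PySem.List.slice pts none (some (-1))).zip pts).map (fun p => p.2 - p.1)
  var ++ List.replicate (numhours - (var.length : Int)).toNat 0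

-- ===== PRECONDITION & SPEC =====
-- Pre_ excludes exactly the inputs where Python A raises IndexError: when the number of
-- change points exceeds len(var) = max(numhours,0), or some change index i ≥ len(values).
def Pre_continresult (numhours : Int) (hr : List Int) (values : List Int) : Prop :=
  ((List.range (hr.length - 1)).filter (fun k => decide (hr.getD k 0 ≠ hr.getD (k + 1) 0))).length ≤ numhours.toNat
  ∧ ∀ k ∈ List.range (hr.length - 1), hr.getD k 0 ≠ hr.getD (k + 1) 0 → k < values.length
instance (numhours : Int) (hr : List Int) (values : List Int) : Decidable (Pre_continresult numhours hr values) := by unfold Pre_continresult; infer_instance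

def pvWitness_continresult : Int × List Int × List Int := (2, [1, 2, 3], [5, 6, 7])

def Spec_continresult (numhours : Int) (hr : List Int) (values : List Int) (out : List Int) : Prop := out = continresult_alt numhours hr values
instance (numhours : Int) (hr : List Int) (values : List Int) (out : List Int) : Decidable (Spec_continresult numhours hr values out) := by unfold Spec_continresult; infer_instance

-- ===== CLAIM (what is proved, stated in full; the proofs are below) =====
def Claim_equal_continresult : Prop := ∀ (numhours : Int) (hr : List Int) (values : List Int), Dom_continresult numhours hr values → Pre_continresult numhours hr values → Spec_continresult numhours hr values (continresult numhours hr values)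
-- ===== LEMMAS AND PROOFS =====

-- sequence of in-order writes of successive deltas, starting at slot j with running value temp
def writes (values : List Int) (m : List Int) (var : List Int) (j : Nat) (temp : Int) : List Int :=
  match m with
  | [] => var
  | i :: t => writes values t (var.set j (PySem.List.pyGetD values i 0 - temp)) (j + 1) (PySem.List.pyGetD values i 0)

-- successive differences of a list of values, previous value temp
def diffs (temp : Int) : List Int → List Int
  | [] => []
  | v :: t => (v - temp) :: diffs v t

theorem length_diffs (temp : Int) (l : List Int) : (diffs temp l).length = l.length := by
  induction l generalizing temp with
  | nil => rfl
  | cons v t ih => simp [diffs, ih]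

theorem foldl_contStep_eq_writes (hr values : List Int) (l : List Int) (var : List Int) (j : Nat) (temp : Int) :
    (l.foldl (contStep hr values) (var, (j : Int), temp)).1
      = writes values (l.filter (fun i => decide (PySem.List.pyGetD hr i 0 ≠ PySem.List.pyGetD hr (i + 1) 0))) var j temp := by
  induction l generalizing var j temp with
  | nil => rfl
  | cons i t ih =>
    by_cases h : PySem.List.pyGetD hr i 0 ≠ PySem.List.pyGetD hr (i + 1) 0
    · have hstep : ((j : Int) + 1) = ((j + 1 : Nat) : Int) := by push_cast; ring
      rw [List.foldl_cons, List.filter_cons_of_pos (by simpa using h)]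
      simp only [contStep, if_pos h, hstep, Int.toNat_natCast]
      rw [show temp + (PySem.List.pyGetD values i 0 - temp) = PySem.List.pyGetD values i 0 from by ring]
      rw [ih]
      rfl
    · rw [List.foldl_cons, List.filter_cons_of_neg (by simpa using h)]
      simp only [contStep, if_neg h]
      exact ih var j temp

theorem writes_cons_shift (values : List Int) (m : List Int) (x : Int) (var : List Int) (j : Nat) (temp : Int) :
    writes values m (x :: var) (j + 1) temp = x :: writes values m var j temp := by
  induction m generalizing var j temp with
  | nil => rfl
  | cons i t ih => simp [writes, List.set, ih]

theorem writes_replicate (values : List Int) (m : List Int) (n : Nat) (temp : Int) (h : m.length ≤ n) :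
    writes values m (List.replicate n 0) 0 temp
      = diffs temp (m.map (fun i => PySem.List.pyGetD values i 0)) ++ List.replicate (n - m.length) 0 := by
  induction m generalizing n temp with
  | nil => simp [writes, diffs]
  | cons i t ih =>
    cases n with
    | zero => simp at h
    | succ n' =>
      have hn : t.length ≤ n' := by simpa using h
      simp only [writes, List.replicate_succ, List.set, writes_cons_shift, List.map_cons, diffs]
      rw [ih _ _ hn]
      simp

theorem zip_diffs (pts : List Int) (temp : Int) :
    ((temp :: pts.dropLast).zip pts).map (fun p => p.2 - p.1) = diffs temp pts := by
  induction pts generalizing temp with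
  | nil => rfl
  | cons v t ih =>
    cases t with
    | nil => simp [diffs]
    | cons v' t' =>
      rw [List.dropLast_cons₂, List.zip_cons_cons, List.map_cons, ih v]
      rfl

theorem map_const_zero_eq_replicate (l : List Int) :
    l.map (fun _ => (0 : Int)) = List.replicate l.length 0 := by
  induction l with
  | nil => rfl
  | cons x t ih => simp [ih, List.replicate_succ]

-- Pre_'s count (over List.range / getD) names the same change positions as the ports' pyRange filter
theorem filter_pyRange_eq (hr : List Int) :
    ((PySem.List.pyRange 0 ((hr.length : Int) - 1) 1).filter
        (fun i => decide (PySem.List.pyGetD hr i 0 ≠ PySem.List.pyGetD hr (i + 1) 0)))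
      = ((List.range (hr.length - 1)).filter (fun k => decide (hr.getD k 0 ≠ hr.getD (k + 1) 0))).map (fun k : Nat => (k : Int)) := by
  rw [PySem.List.pyRange_one, List.filter_map]
  have hfun : (fun k : Nat => (0 : Int) + k) = (fun k : Nat => (k : Int)) := by funext k; ring
  rw [hfun]
  have hlen : (((hr.length : Int) - 1) - 0).toNat = hr.length - 1 := by omega
  rw [hlen]
  refine congrArg (List.map fun k : Nat => (k : Int)) ?_
  refine congrArg (fun p => List.filter p (List.range (hr.length - 1))) ?_
  funext k
  simp only [Function.comp_apply]
  have h1 : PySem.List.pyGetD hr (k : Int) 0 = hr.getD k 0 := PySem.List.pyGetD_natCast hr k 0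
  have h2 : PySem.List.pyGetD hr ((k : Int) + 1) 0 = hr.getD (k + 1) 0 := by
    rw [show ((k : Int) + 1) = ((k + 1 : Nat) : Int) from by push_cast; ring]
    exact PySem.List.pyGetD_natCast hr (k + 1) 0
  rw [h1, h2]

theorem continresult_eq_alt (numhours : Int) (hr : List Int) (values : List Int)
    (hpre : Pre_continresult numhours hr values) :
    continresult numhours hr values = continresult_alt numhours hr values := by
  obtain ⟨h1, -⟩ := hpre
  have key := foldl_contStep_eq_writes hr values (PySem.List.pyRange 0 ((hr.length : Int) - 1) 1)
      ((PySem.List.pyRange 0 numhours 1).map (fun _ => 0)) 0 0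
  simp only [Nat.cast_zero] at key
  simp only [continresult, continresult_alt]
  rw [key, filter_pyRange_eq]
  set mk := ((List.range (hr.length - 1)).filter (fun k => decide (hr.getD k 0 ≠ hr.getD (k + 1) 0))) with hmk
  have hvar0 : (PySem.List.pyRange 0 numhours 1).map (fun _ => (0 : Int)) = List.replicate numhours.toNat 0 := by
    rw [map_const_zero_eq_replicate, PySem.List.length_pyRange_one]
    norm_num
  have hlen : (mk.map (fun k : Nat => (k : Int))).length ≤ numhours.toNat := by simpa using h1
  rw [hvar0, writes_replicate _ _ _ _ hlen, PySem.List.slice_to_neg_one, zip_diffs]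
  congr 1
  congr 1
  rw [List.length_map, length_diffs, List.length_map, List.length_map]
  have : mk.length ≤ numhours.toNat := by simpa using h1
  omega

-- ===== VERDICT (by name: the statement is the Claim_ definition above) =====
theorem continresult_spec : Claim_equal_continresult := by
  intro numhours hr values _ hpre
  unfold Spec_continresult
  exact continresult_eq_alt numhours hr values hpre
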